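-- pv_equiv track=rewrite | github.com/Daldek/DaftAcademy | Funkcje.py | containers_in_classes
-- ===== SOURCE A (Python) =====
-- def containers_in_classes(class_dict, input_list):
--     class_size = {}
--     for k, v in class_dict.items():
--         for value_pair in input_list:
--             if k == value_pair[0]:
--                 v = v + value_pair[1]
--         class_size.update({k: v})
--     return class_size
-- ===== SOURCE B (Python) =====
-- def _tally(input_list):
--     sums = {}
--     for k, w in input_list:
--         sums[k] = sums.get(k, 0) + w
--     return sums
--
-- def containers_in_classes(class_dict, input_list):
--     sums = _tally(input_list)
--     return {k: v + sums.get(k, 0) for k, v in class_dict.items()}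
-- ===== Notes on version B (the rewrite author's own statement) =====
-- stated objective: faster
-- what changed: Replaces A's rescan of input_list for every class key by a single tally pass building a dict of per-key sums, then one comprehension over class_dict combining them.
import Mathlib
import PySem

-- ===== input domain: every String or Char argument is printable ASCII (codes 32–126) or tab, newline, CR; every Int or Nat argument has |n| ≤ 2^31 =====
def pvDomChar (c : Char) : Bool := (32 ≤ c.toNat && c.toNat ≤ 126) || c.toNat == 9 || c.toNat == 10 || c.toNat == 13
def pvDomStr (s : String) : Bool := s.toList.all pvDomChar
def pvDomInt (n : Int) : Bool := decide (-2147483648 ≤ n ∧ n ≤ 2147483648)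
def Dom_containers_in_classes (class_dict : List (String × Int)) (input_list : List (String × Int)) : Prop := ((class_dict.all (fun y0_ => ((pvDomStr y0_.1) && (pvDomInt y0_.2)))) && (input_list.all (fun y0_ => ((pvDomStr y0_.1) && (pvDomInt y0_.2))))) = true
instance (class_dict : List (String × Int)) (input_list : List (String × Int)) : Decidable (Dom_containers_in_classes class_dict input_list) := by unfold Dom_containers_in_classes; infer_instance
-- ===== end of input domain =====

-- B replaces A's rescan of input_list per class key by one tally pass over input_list, then combines; asymptotically faster.


-- ===== PORT A =====
-- class_dict is a Python dict: marshal the association list through PySem.Dict.ofList.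
def containers_in_classes (class_dict : List (String × Int)) (input_list : List (String × Int)) : List (String × Int) :=
  ((PySem.Dict.ofList class_dict).items.foldl
    (fun cs kv =>
      cs.insert kv.1 (input_list.foldl (fun v p => if kv.1 == p.1 then v + p.2 else v) kv.2))
    (PySem.Dict.empty : PySem.Dict String Int)).items

-- ===== PORT B =====
-- B's _tally loop: structural recursion over input_list accumulating a sums dict.
def pvTally : List (String × Int) → PySem.Dict String Int → PySem.Dict String Int
  | [], sums => sums
  | (k, w) :: rest, sums => pvTally rest (sums.insert k (sums.getD k 0 + w))

-- B's result comprehension: structural recursion over the dict's items.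
def pvCombine (sums : PySem.Dict String Int) : List (String × Int) → List (String × Int)
  | [] => []
  | (k, v) :: rest => (k, v + sums.getD k 0) :: pvCombine sums rest

def containers_in_classes_alt (class_dict : List (String × Int)) (input_list : List (String × Int)) : List (String × Int) :=
  pvCombine (pvTally input_list PySem.Dict.empty) (PySem.Dict.ofList class_dict).items

-- ===== PRECONDITION & SPEC =====
def Spec_containers_in_classes (class_dict : List (String × Int)) (input_list : List (String × Int)) (out : List (String × Int)) : Prop := out = containers_in_classes_alt class_dict input_list
instance (class_dict : List (String × Int)) (input_list : List (String × Int)) (out : List (String × Int)) : Decidable (Spec_containers_in_classes class_dict input_list out) := by unfold Spec_containers_in_classes; infer_instance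

-- ===== CLAIM =====
def Claim_equal_containers_in_classes : Prop := ∀ (class_dict : List (String × Int)) (input_list : List (String × Int)), Dom_containers_in_classes class_dict input_list → Spec_containers_in_classes class_dict input_list (containers_in_classes class_dict input_list)

-- ===== LEMMAS AND PROOFS =====

-- A's inner scan over input_list adds exactly the sum of matched second components.
theorem foldl_matched_sum (il : List (String × Int)) (k : String) (v0 : Int) :
    il.foldl (fun v p => if k == p.1 then v + p.2 else v) v0
      = v0 + ((il.filter (fun p => p.1 == k)).map Prod.snd).sum := by
  induction il generalizing v0 with
  | nil => simp
  | cons p t ih =>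
    rw [List.foldl_cons, ih, List.filter_cons]
    by_cases h : p.1 = k
    · have hb : (k == p.1) = true := by simp [h]
      have hf : (p.1 == k) = true := by simp [h]
      rw [hb, hf]; simp; ring
    · have hb : (k == p.1) = false := by simp [Ne.symm h]
      have hf : (p.1 == k) = false := by simp [h]
      rw [hb, hf]; simp

-- B's tally dict holds, for each key, the sum of matched second components.
theorem pvTally_getD (il : List (String × Int)) (d : PySem.Dict String Int) (k : String) :
    (pvTally il d).getD k 0
      = d.getD k 0 + ((il.filter (fun p => p.1 == k)).map Prod.snd).sum := by
  induction il generalizing d with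
  | nil => simp [pvTally]
  | cons p t ih =>
    rw [show pvTally (p :: t) d = pvTally t (d.insert p.1 (d.getD p.1 0 + p.2)) from rfl,
        ih, List.filter_cons]
    by_cases h : p.1 = k
    · have hf : (p.1 == k) = true := by simp [h]
      rw [hf]; simp [PySem.Dict.getD_insert, h]; ring
    · have hf : (p.1 == k) = false := by simp [h]
      rw [hf]; simp [PySem.Dict.getD_insert, Ne.symm h]

-- pvCombine is a map over the items.
theorem pvCombine_eq_map (sums : PySem.Dict String Int) (l : List (String × Int)) :
    pvCombine sums l = l.map (fun kv => (kv.1, kv.2 + sums.getD kv.1 0)) := by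
  induction l with
  | nil => rfl
  | cons p t ih => cases p; simp [pvCombine, ih]

-- ===== VERDICT =====
theorem containers_in_classes_spec : Claim_equal_containers_in_classes := by
  intro class_dict input_list _
  unfold Spec_containers_in_classes containers_in_classes containers_in_classes_alt
  have hnd : (List.map Prod.fst (PySem.Dict.ofList class_dict).items).Nodup := by
    have := PySem.Dict.nodup_keys_ofList (κ := String) (ν := Int) class_dict
    simpa [PySem.Dict.keys] using this
  have h := PySem.Dict.items_foldl_insert_fresh
      ((PySem.Dict.ofList class_dict).items)
      (Prod.fst)
      (fun kv => List.foldl (fun v p => if (kv.1 == p.1) = true then v + p.2 else v) kv.2 input_list)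
      (PySem.Dict.empty)
      (fun a _ => PySem.Dict.contains_empty _) hnd
  rw [h, pvCombine_eq_map]
  simp only [show (PySem.Dict.empty : PySem.Dict String Int).items = [] from rfl, List.nil_append]
  apply List.map_congr_left
  intro kv _
  rw [foldl_matched_sum, pvTally_getD]
  simp
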